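-- pv_equiv track=rewrite | github.com/woodenscalpel/AdventofCodeArchive | aoc24/d9/a3.py | consolidatespaces
-- ===== SOURCE A (Python) =====
-- def consolidatespaces(uncompressed):
--     newlist = []
--     idx = 0
--     while idx < len(uncompressed):
--         if uncompressed[idx][0] != ".":
--             newlist.append(uncompressed[idx])
--             idx +=1
--         else:
--             free = 0
--             while uncompressed[idx][0] == ".":
--                 free += uncompressed[idx][1]
--                 idx += 1
--                 if idx > len(uncompressed)-1:
--                     break
--             newlist.append([".",free])
--     return newlist
-- ===== SOURCE B (Python) =====
-- def _glue(left, right):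
--     if left and right and left[-1][0] == '.' and right[0][0] == '.':
--         return left[:-1] + [['.', left[-1][1] + right[0][1]]] + right[1:]
--     return left + right
--
-- def consolidatespaces(uncompressed):
--     if len(uncompressed) <= 1:
--         if uncompressed and uncompressed[0][0] == '.':
--             return [['.', uncompressed[0][1]]]
--         return list(uncompressed)
--     mid = len(uncompressed) // 2
--     return _glue(consolidatespaces(uncompressed[:mid]),
--                  consolidatespaces(uncompressed[mid:]))
-- ===== Notes on version B (the rewrite author's own statement) =====
-- stated objective: alternative
-- what changed: Replaced A's linear index-cursor scan with a nested run-accumulation loop by a divide-and-conquer: recursively consolidate the two halves of the list and merge them with a boundary step that fuses a trailing free entry of the left half with a leading free entry of the right half.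
import Mathlib
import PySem

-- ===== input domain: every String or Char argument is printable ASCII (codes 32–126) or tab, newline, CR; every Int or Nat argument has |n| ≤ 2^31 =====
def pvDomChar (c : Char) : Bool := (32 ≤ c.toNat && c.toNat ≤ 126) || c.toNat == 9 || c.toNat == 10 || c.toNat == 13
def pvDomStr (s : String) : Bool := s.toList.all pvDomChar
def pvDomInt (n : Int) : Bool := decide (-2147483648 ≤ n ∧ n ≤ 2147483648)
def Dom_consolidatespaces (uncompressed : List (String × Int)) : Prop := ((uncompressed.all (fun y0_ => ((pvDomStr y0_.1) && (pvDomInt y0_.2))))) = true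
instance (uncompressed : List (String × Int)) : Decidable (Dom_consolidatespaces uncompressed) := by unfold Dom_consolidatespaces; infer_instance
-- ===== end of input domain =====

-- B replaces A's linear index-cursor scan by a divide-and-conquer: recurse on the two
-- halves and merge the boundary entries if both are free (alternative decomposition,
-- return value only, same result).

-- ===== PORT A =====
-- inner `while uncompressed[idx][0] == "."` loop: accumulates `free`, advances idx,
-- stops when idx runs past the end or the entry is no longer free.  The fuel
-- (strictly above the remaining iteration count at every call) only makes the
-- recursion structural and is never exhausted on reachable calls.
def pvInnerA (fuel : Nat) (xs : List (String × Int)) (idx : Nat) (free : Int) : Int × Nat :=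
  match fuel with
  | 0 => (free, idx)
  | fuel + 1 =>
    if h : idx < xs.length then
      if xs[idx].1 = "." then
        pvInnerA fuel xs (idx + 1) (free + xs[idx].2)
      else (free, idx)
    else (free, idx)

-- outer `while idx < len(uncompressed)` loop of A (the first free entry is unrolled
-- into the pvInnerA call exactly as A's inner loop enters with its guard known true)
def pvOuterA (fuel : Nat) (xs : List (String × Int)) (idx : Nat) : List (String × Int) :=
  match fuel with
  | 0 => []
  | fuel + 1 =>
    if h : idx < xs.length then
      if xs[idx].1 ≠ "." then
        xs[idx] :: pvOuterA fuel xs (idx + 1)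
      else
        let r := pvInnerA xs.length xs (idx + 1) (0 + xs[idx].2)
        (".", r.1) :: pvOuterA fuel xs r.2
    else []

def consolidatespaces (uncompressed : List (String × Int)) : List (String × Int) :=
  pvOuterA uncompressed.length uncompressed 0

-- ===== PORT B =====
-- `_glue(left, right)` from Source B: merge the boundary pair if both sides end/start free.
def pvGlue (l r : List (String × Int)) : List (String × Int) :=
  match l.getLast?, r.head? with
  | some a, some b =>
      if a.1 = "." ∧ b.1 = "." then l.dropLast ++ [(".", a.2 + b.2)] ++ r.tail
      else l ++ r
  | _, _ => l ++ r

-- divide and conquer of Source B: halves via take/drop ( = Python's slices [:mid]/[mid:] );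
-- the fuel (initially the length, strictly above every recursion depth) only makes the
-- structural recursion evident and is never exhausted on reachable calls.
def pvDC (fuel : Nat) (xs : List (String × Int)) : List (String × Int) :=
  match fuel with
  | 0 => []
  | fuel + 1 =>
    if xs.length ≤ 1 then
      match xs with
      | [] => []
      | e :: _ => if e.1 = "." then [(".", e.2)] else xs
    else
      let mid := xs.length / 2
      pvGlue (pvDC fuel (xs.take mid)) (pvDC fuel (xs.drop mid))

def consolidatespaces_alt (uncompressed : List (String × Int)) : List (String × Int) :=
  pvDC uncompressed.length uncompressed

-- ===== PRECONDITION & SPEC =====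
def Spec_consolidatespaces (uncompressed : List (String × Int)) (out : List (String × Int)) : Prop := out = consolidatespaces_alt uncompressed
instance (uncompressed : List (String × Int)) (out : List (String × Int)) : Decidable (Spec_consolidatespaces uncompressed out) := by unfold Spec_consolidatespaces; infer_instance

-- ===== CLAIM (what is proved, stated in full; the proofs are below) =====
def Claim_equal_consolidatespaces : Prop := ∀ (uncompressed : List (String × Int)), Dom_consolidatespaces uncompressed → Spec_consolidatespaces uncompressed (consolidatespaces uncompressed)

-- ===== LEMMAS AND PROOFS =====

-- proof-side normal form: run-compression, one element at a time
def pvNorm : List (String × Int) → List (String × Int)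
  | [] => []
  | e :: t =>
    if e.1 = "." then
      (".", e.2 + ((t.takeWhile (fun x => x.1 == ".")).map Prod.snd).sum)
        :: pvNorm (t.dropWhile (fun x => x.1 == "."))
    else e :: pvNorm t
termination_by l => l.length
decreasing_by
  · have := List.length_dropWhile_le (p := fun x : String × Int => x.1 == ".") t
    simp at this ⊢; omega
  · simp


theorem pvNorm_nil : pvNorm [] = [] := by rw [pvNorm]
theorem pvNorm_cons (e : String × Int) (t : List (String × Int)) :
    pvNorm (e :: t) = if e.1 = "." then
      (".", e.2 + ((t.takeWhile (fun x => x.1 == ".")).map Prod.snd).sum)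
        :: pvNorm (t.dropWhile (fun x => x.1 == "."))
    else e :: pvNorm t := by rw [pvNorm]

theorem pvNorm_ne_nil (l : List (String × Int)) (h : l ≠ []) : pvNorm l ≠ [] := by
  cases l with
  | nil => exact absurd rfl h
  | cons e t => rw [pvNorm_cons]; split_ifs <;> simp

theorem pv_dropWhile_eq_drop {a : Type} (p : a → Bool) (l : List a) :
    l.dropWhile p = l.drop (l.takeWhile p).length := by
  induction l with
  | nil => simp
  | cons x t ih => by_cases h : p x <;> simp [h, ih]

theorem pvGlue_nil_left (r : List (String × Int)) : pvGlue [] r = r := by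
  simp [pvGlue]

theorem pvGlue_cons (e : String × Int) (z r : List (String × Int))
    (h : e.1 ≠ "." ∨ z ≠ []) : pvGlue (e :: z) r = e :: pvGlue z r := by
  cases z with
  | nil =>
      have he : e.1 ≠ "." := by tauto
      cases r with
      | nil => simp [pvGlue]
      | cons b r' => simp [pvGlue, he]
  | cons z0 zt =>
      cases r with
      | nil => simp [pvGlue]
      | cons b r' =>
          cases hgl : (z0 :: zt).getLast? with
          | none => simp at hgl
          | some a =>
              by_cases hc : a.1 = "." ∧ b.1 = "."
              · simp [pvGlue, List.getLast?_cons_cons, hgl, hc, List.dropLast_cons_of_ne_nil]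
              · simp [pvGlue, List.getLast?_cons_cons, hgl, hc]

theorem pvGlue_norm (l r : List (String × Int)) :
    pvGlue (pvNorm l) (pvNorm r) = pvNorm (l ++ r) := by
  fun_induction pvNorm l with
  | case1 => simp [pvGlue_nil_left]
  | case2 e t hfree ih =>
      by_cases hd : t.dropWhile (fun x => x.1 == ".") = []
      · have ht : t.takeWhile (fun x => x.1 == ".") = t := by
          have := List.takeWhile_append_dropWhile (p := fun x : String × Int => x.1 == ".") (l := t)
          rw [hd, List.append_nil] at this; exact this
        have htw : ((t ++ r).takeWhile (fun x => x.1 == ".")) = t ++ r.takeWhile (fun x => x.1 == ".") := by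
          rw [List.takeWhile_append]; simp [ht]
        have hdw : ((t ++ r).dropWhile (fun x => x.1 == ".")) = r.dropWhile (fun x => x.1 == ".") := by
          rw [List.dropWhile_append]; simp [hd]
        rw [List.cons_append, pvNorm_cons, if_pos hfree, htw, hdw, ht, hd]
        cases r with
        | nil => simp [pvNorm_nil, pvGlue]
        | cons f r' =>
            by_cases hf : f.1 = "."
            · rw [pvNorm_cons, if_pos hf]
              simp [pvGlue, pvNorm_nil, hf]
              omega
            · rw [pvNorm_cons, if_neg hf]
              simp [pvGlue, pvNorm_nil, hf]
              rw [pvNorm_cons, if_neg hf]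
      · have hne : ((t.takeWhile (fun x => x.1 == ".")).length) ≠ t.length := by
          intro hEq
          apply hd
          rw [pv_dropWhile_eq_drop, hEq]
          simp
        have htw : ((t ++ r).takeWhile (fun x => x.1 == ".")) = t.takeWhile (fun x => x.1 == ".") := by
          rw [List.takeWhile_append]; simp [hne]
        have hdw : ((t ++ r).dropWhile (fun x => x.1 == ".")) = (t.dropWhile (fun x => x.1 == ".")) ++ r := by
          rw [List.dropWhile_append]; simp [hd]
        rw [List.cons_append, pvNorm_cons, if_pos hfree, htw, hdw, ← ih]
        exact pvGlue_cons _ _ _ (Or.inr (pvNorm_ne_nil _ hd))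
  | case3 e t hfree ih =>
      rw [List.cons_append, pvNorm_cons, if_neg hfree, ← ih]
      exact pvGlue_cons _ _ _ (Or.inl hfree)

theorem pvDC_eq_norm (fuel : Nat) (xs : List (String × Int)) (hf : xs.length ≤ fuel) :
    pvDC fuel xs = pvNorm xs := by
  induction fuel generalizing xs with
  | zero =>
      have : xs = [] := List.eq_nil_of_length_eq_zero (by omega)
      subst this
      simp [pvDC, pvNorm_nil]
  | succ fuel ih =>
      simp only [pvDC]
      by_cases h : xs.length ≤ 1
      · rw [if_pos h]
        cases xs with
        | nil => exact pvNorm_nil.symm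
        | cons e t =>
            cases t with
            | nil =>
                by_cases he : e.1 = "." <;>
                  simp [pvNorm_cons, pvNorm_nil, he]
            | cons a b => simp at h
      · rw [if_neg h]
        simp at h
        have h2 : 2 ≤ xs.length := by omega
        have hm1 : 1 ≤ xs.length / 2 := by omega
        have hmlt : xs.length / 2 < xs.length := by omega
        rw [ih (xs.take (xs.length / 2)) (by simp; omega),
            ih (xs.drop (xs.length / 2)) (by simp; omega),
            pvGlue_norm, List.take_append_drop]

theorem pvAlt_eq_norm (xs : List (String × Int)) :
    consolidatespaces_alt xs = pvNorm xs := by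
  exact pvDC_eq_norm xs.length xs le_rfl

theorem pvInnerA_eq (xs : List (String × Int)) (fuel idx : Nat) (free : Int)
    (hf : xs.length - idx ≤ fuel) :
    pvInnerA fuel xs idx free =
      (free + (((xs.drop idx).takeWhile (fun e => e.1 == ".")).map Prod.snd).sum,
       idx + ((xs.drop idx).takeWhile (fun e => e.1 == ".")).length) := by
  induction fuel generalizing idx free with
  | zero =>
      have : xs.drop idx = [] := List.drop_eq_nil_of_le (by omega)
      simp [pvInnerA, this]
  | succ fuel ih =>
      rw [pvInnerA]
      by_cases h : idx < xs.length
      · rw [dif_pos h]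
        have hd : xs.drop idx = xs[idx] :: xs.drop (idx + 1) := (List.getElem_cons_drop h).symm
        by_cases hdot : xs[idx].1 = "."
        · rw [if_pos hdot, ih (idx + 1) _ (by omega)]
          have hb : (xs[idx].1 == ".") = true := by simp [hdot]
          rw [hd, List.takeWhile_cons, hb]
          simp
          constructor
          · ring
          · omega
        · rw [if_neg hdot]
          have hb : (xs[idx].1 == ".") = false := by simp [hdot]
          rw [hd, List.takeWhile_cons, hb]
          simp
      · rw [dif_neg h]
        have : xs.drop idx = [] := List.drop_eq_nil_of_le (by omega)
        simp [this]

-- A's loops compute the run-compression normal form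
theorem pvOuterA_eq_norm (xs : List (String × Int)) (fuel idx : Nat)
    (hf : xs.length - idx ≤ fuel) :
    pvOuterA fuel xs idx = pvNorm (xs.drop idx) := by
  induction fuel generalizing idx with
  | zero =>
      have : xs.drop idx = [] := List.drop_eq_nil_of_le (by omega)
      rw [pvOuterA, this, pvNorm_nil]
  | succ fuel ih =>
      rw [pvOuterA]
      by_cases h : idx < xs.length
      · rw [dif_pos h]
        have hd : xs.drop idx = xs[idx] :: xs.drop (idx + 1) := (List.getElem_cons_drop h).symm
        by_cases hdot : xs[idx].1 = "."
        · rw [if_neg (by simpa using hdot)]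
          have hr : pvInnerA xs.length xs (idx + 1) (0 + xs[idx].2) =
              (0 + xs[idx].2 + (((xs.drop (idx + 1)).takeWhile (fun e => e.1 == ".")).map Prod.snd).sum,
               idx + 1 + ((xs.drop (idx + 1)).takeWhile (fun e => e.1 == ".")).length) :=
            pvInnerA_eq xs xs.length (idx + 1) _ (by omega)
          have hdw : (xs.drop (idx + 1)).dropWhile (fun x => x.1 == ".") =
              xs.drop (idx + 1 + ((xs.drop (idx + 1)).takeWhile (fun x => x.1 == ".")).length) := by
            rw [pv_dropWhile_eq_drop, List.drop_drop]
          simp only [hr]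
          rw [hd, pvNorm_cons, if_pos hdot, hdw,
              ih (idx + 1 + ((xs.drop (idx + 1)).takeWhile (fun x => x.1 == ".")).length) (by omega)]
          simp
        · rw [if_pos hdot, hd, pvNorm_cons, if_neg hdot, ih (idx + 1) (by omega)]
      · rw [dif_neg h]
        have : xs.drop idx = [] := List.drop_eq_nil_of_le (by omega)
        rw [this, pvNorm_nil]

-- ===== VERDICT (by name: the statement is the Claim_ definition above) =====
theorem consolidatespaces_spec : Claim_equal_consolidatespaces := by
  intro xs _
  unfold Spec_consolidatespaces consolidatespaces
  rw [pvOuterA_eq_norm xs xs.length 0 (by omega), pvAlt_eq_norm]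
  simp
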